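-- pv_equiv track=rewrite | github.com/QuocCuong17/Python_CodePTIT | Hello_My_Fen/KiemTraHeCoSo5.py | check
-- ===== SOURCE A (Python) =====
-- def check(s):
--     for i in s:
--         if i not in '01234':
--             return False
--     sum = 0
--     for i in s:
--         sum += int(i)
--     if sum != 5:
--         return False
--     return True
-- ===== SOURCE B (Python) =====
-- def check(s):
--     counts = {}
--     for ch in s:
--         counts[ch] = counts.get(ch, 0) + 1
--     if any(d not in '01234' for d in counts):
--         return False
--     return sum(int(d) * k for d, k in counts.items()) == 5
-- ===== Notes on version B (the rewrite author's own statement) =====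
-- stated objective: alternative
-- what changed: B builds a character frequency table in one pass and then validates and computes the digit sum as a weighted sum over the distinct characters only, instead of A's two full scans of the raw string.
import Mathlib
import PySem

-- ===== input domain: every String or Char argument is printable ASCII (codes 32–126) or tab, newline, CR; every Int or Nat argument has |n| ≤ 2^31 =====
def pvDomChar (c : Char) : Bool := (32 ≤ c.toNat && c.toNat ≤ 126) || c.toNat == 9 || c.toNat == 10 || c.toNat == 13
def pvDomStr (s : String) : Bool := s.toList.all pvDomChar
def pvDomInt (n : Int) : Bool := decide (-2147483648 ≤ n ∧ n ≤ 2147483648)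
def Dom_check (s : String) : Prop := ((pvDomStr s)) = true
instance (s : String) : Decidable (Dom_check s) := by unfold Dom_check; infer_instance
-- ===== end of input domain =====

-- B replaces A's two full scans of the string by one counting pass plus a weighted sum over the distinct characters (alternative decomposition, same asymptotic cost).


-- ===== PORT A =====
-- int(i): both Pythons call int only on characters already validated to be in '01234',
-- where PySem.Int.ofStr? always returns some; the getD 0 default is unreachable.
def pyDigitInt (c : Char) : Int := (PySem.Int.ofStr? (String.ofList [c])).getD 0

def check (s : String) : Bool :=
  -- first loop: early return False on a character not in '01234'
  if s.toList.any (fun c => !("01234".toList.contains c)) then false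
  else
    -- second loop: sum += int(i)
    let sum := s.toList.foldl (fun acc c => acc + pyDigitInt c) 0
    if sum ≠ 5 then false else true

-- ===== PORT B =====
def check_alt (s : String) : Bool :=
  -- counts[ch] = counts.get(ch, 0) + 1
  let counts : PySem.Dict Char Int :=
    s.toList.foldl (fun d c => d.insert c (d.getD c 0 + 1)) PySem.Dict.empty
  -- any(d not in '01234' for d in counts)
  if counts.keys.any (fun d => !("01234".toList.contains d)) then false
  else
    -- sum(int(d) * k for d, k in counts.items()) == 5
    decide ((counts.items.foldl (fun acc p => acc + pyDigitInt p.1 * p.2) 0) = 5)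

-- ===== PRECONDITION & SPEC =====
def Spec_check (s : String) (out : Bool) : Prop := out = check_alt s
instance (s : String) (out : Bool) : Decidable (Spec_check s out) := by unfold Spec_check; infer_instance

-- ===== CLAIM (what is proved, stated in full; the proofs are below) =====
def Claim_equal_check : Prop := ∀ (s : String), Dom_check s → Spec_check s (check s)

-- ===== LEMMAS AND PROOFS =====

-- foldl-with-accumulator equals sum of the mapped list
theorem foldl_add_eq_sum_map {α : Type} (f : α → Int) (l : List α) (a : Int) :
    l.foldl (fun acc c => acc + f c) a = a + (l.map f).sum := by
  induction l generalizing a with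
  | nil => simp
  | cons x xs ih => simp [List.foldl_cons, ih, add_assoc]

-- the weighted sum over the distinct characters equals the plain sum over the string
theorem weighted_sum_eq (f : Char → Int) (l : List Char) :
    ((PySem.Set.ofList l).map (fun k => f k * (l.count k : Int))).sum = (l.map f).sum := by
  rw [← List.sum_toFinset _ (PySem.Set.nodup_ofList l)]
  have htf : (PySem.Set.ofList l).toFinset = l.toFinset := by
    ext x; simp [PySem.Set.mem_ofList]
  rw [htf, Finset.sum_list_map_count l f]
  refine Finset.sum_congr rfl (fun x _ => ?_)
  simp [mul_comm]

-- the validity test over distinct keys equals the test over the raw string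
theorem any_ofList_eq (p : Char → Bool) (l : List Char) :
    (PySem.Set.ofList l).any p = l.any p := by
  rcases h : l.any p with _ | _
  · simp only [List.any_eq_false] at h ⊢
    intro x hx; exact h x ((PySem.Set.mem_ofList _ _).mp hx)
  · simp only [List.any_eq_true] at h ⊢
    obtain ⟨x, hx, hpx⟩ := h
    exact ⟨x, (PySem.Set.mem_ofList _ _).mpr hx, hpx⟩

-- ===== VERDICT (by name: the statement is the Claim_ definition above) =====
theorem check_spec : Claim_equal_check := by
  intro s _
  unfold Spec_check check check_alt
  have hctr := PySem.Dict.foldl_insert_getD_add_one_eq_counter (xs := s.toList)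
  simp only [hctr, PySem.Dict.keys_counter, any_ofList_eq, PySem.Dict.items_counter]
  by_cases h : s.toList.any (fun c => !("01234".toList.contains c)) = true
  · rw [if_pos h, if_pos h]
  · rw [if_neg h, if_neg h]
    rw [List.foldl_map, foldl_add_eq_sum_map (fun k => pyDigitInt k * (s.toList.count k : Int)),
        weighted_sum_eq, foldl_add_eq_sum_map]
    by_cases h5 : (0 : Int) + (s.toList.map pyDigitInt).sum = 5 <;> simp [h5]
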